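-- pv_equiv track=rewrite | github.com/josongsong/semantica-codegraph | packages/codegraph-search/codegraph_search/infrastructure/evaluation/metrics_legacy.py | relevant_in_top_k_counts
-- ===== SOURCE A (Python) =====
-- from collections.abc import Sequence
--
-- def relevant_in_top_k_counts(
--     retrieved_ids: Sequence[str],
--     relevant_ids: set[str],
--     k_values: list[int] | None = None,
-- ) -> dict[int, int]:
--     """
--     Count relevant results in top k for various k values.
--
--     Args:
--         retrieved_ids: Ordered list of retrieved chunk IDs
--         relevant_ids: Set of ground truth relevant chunk IDs
--         k_values: List of k values to compute (default: [1, 5, 10, 20])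
--
--     Returns:
--         Dictionary mapping k -> count of relevant results in top k
--
--     Example:
--         >>> relevant_in_top_k_counts(["c1", "c2", "c3", "c4"], {"c1", "c3"}, [1, 2, 5])
--         {1: 1, 2: 1, 5: 2}
--     """
--     if k_values is None:
--         k_values = [1, 5, 10, 20]
--
--     counts = {}
--     for k in k_values:
--         top_k = retrieved_ids[:k]
--         count = sum(1 for chunk_id in top_k if chunk_id in relevant_ids)
--         counts[k] = count
--
--     return counts
-- ===== SOURCE B (Python) =====
-- def relevant_in_top_k_counts(retrieved_ids, relevant_ids, k_values=None):
--     """Single-pass prefix-count array, then O(1) lookup per k."""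
--     if k_values is None:
--         k_values = [1, 5, 10, 20]
--     prefix = [0]
--     for cid in retrieved_ids:
--         prefix.append(prefix[-1] + (1 if cid in relevant_ids else 0))
--     n = len(retrieved_ids)
--     return {k: prefix[min(k, n) if k >= 0 else max(n + k, 0)] for k in k_values}
-- ===== Notes on version B (the rewrite author's own statement) =====
-- stated objective: faster
-- what changed: Replaced A's per-k slicing and re-counting of the top-k prefix with a single-pass prefix-count array indexed at the clamped position min(k,n) (or max(n+k,0) for negative k) for each k.
import Mathlib
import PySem

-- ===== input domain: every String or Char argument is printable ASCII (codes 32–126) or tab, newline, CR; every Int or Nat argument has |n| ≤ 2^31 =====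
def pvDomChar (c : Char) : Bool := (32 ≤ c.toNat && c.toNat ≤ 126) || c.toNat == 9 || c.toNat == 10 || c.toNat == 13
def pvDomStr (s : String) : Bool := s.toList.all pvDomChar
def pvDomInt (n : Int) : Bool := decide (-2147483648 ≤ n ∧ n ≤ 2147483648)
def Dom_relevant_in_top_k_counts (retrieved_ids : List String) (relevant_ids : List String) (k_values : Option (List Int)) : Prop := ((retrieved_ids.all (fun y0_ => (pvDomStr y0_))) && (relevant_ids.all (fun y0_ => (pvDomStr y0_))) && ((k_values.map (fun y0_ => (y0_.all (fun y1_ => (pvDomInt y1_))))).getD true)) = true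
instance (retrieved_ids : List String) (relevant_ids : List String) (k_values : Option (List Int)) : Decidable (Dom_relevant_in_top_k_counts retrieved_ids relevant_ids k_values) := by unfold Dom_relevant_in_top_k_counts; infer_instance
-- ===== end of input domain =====

-- B replaces A's per-k slice-and-count (O(|k_values|·max_k)) with one prefix-count
-- array built in a single pass over retrieved_ids and an O(1) lookup per k (objective: faster).

-- ===== PORT A =====
-- literal transliteration of A: for each k, take the slice retrieved_ids[:k] and sum
-- 1 over its elements that are in relevant_ids, inserting into a dict.
def relevant_in_top_k_counts (retrieved_ids : List String) (relevant_ids : List String) (k_values : Option (List Int)) : List (Int × Int) :=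
  let ks := k_values.getD [1, 5, 10, 20]
  (ks.foldl (fun counts k =>
      let top_k := PySem.List.slice retrieved_ids none (some k)
      let count : Int := (top_k.map (fun chunk_id => if relevant_ids.contains chunk_id then (1 : Int) else 0)).sum
      counts.insert k count)
    (PySem.Dict.empty : PySem.Dict Int Int)).items

-- ===== PORT B =====
-- literal transliteration of Source B: build the prefix-count list in one pass, then for
-- each k index it at the clamped position min(k,n) (resp. max(n+k,0) for negative k).
def relevant_in_top_k_counts_alt (retrieved_ids : List String) (relevant_ids : List String) (k_values : Option (List Int)) : List (Int × Int) :=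
  let ks := k_values.getD [1, 5, 10, 20]
  let pref : List Int := retrieved_ids.foldl
      (fun acc cid => acc ++ [acc.getLast! + (if relevant_ids.contains cid then 1 else 0)]) [0]
  let n : Int := retrieved_ids.length
  (ks.foldl (fun counts k =>
      counts.insert k (pref.getD (if k ≥ 0 then min k n else max (n + k) 0).toNat 0))
    (PySem.Dict.empty : PySem.Dict Int Int)).items

-- ===== PRECONDITION & SPEC =====
def Spec_relevant_in_top_k_counts (retrieved_ids : List String) (relevant_ids : List String) (k_values : Option (List Int)) (out : List (Int × Int)) : Prop := out = relevant_in_top_k_counts_alt retrieved_ids relevant_ids k_values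
instance (retrieved_ids : List String) (relevant_ids : List String) (k_values : Option (List Int)) (out : List (Int × Int)) : Decidable (Spec_relevant_in_top_k_counts retrieved_ids relevant_ids k_values out) := by unfold Spec_relevant_in_top_k_counts; infer_instance

-- ===== CLAIM (what is proved, stated in full; the proofs are below) =====
def Claim_equal_relevant_in_top_k_counts : Prop := ∀ (retrieved_ids : List String) (relevant_ids : List String) (k_values : Option (List Int)), Dom_relevant_in_top_k_counts retrieved_ids relevant_ids k_values → Spec_relevant_in_top_k_counts retrieved_ids relevant_ids k_values (relevant_in_top_k_counts retrieved_ids relevant_ids k_values)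

-- ===== LEMMAS AND PROOFS =====

-- The prefix list B builds is the table of counts over all prefixes.
theorem pref_eq_map_range (p : String → Bool) (xs : List String) :
    xs.foldl (fun acc cid => acc ++ [acc.getLast! + (if p cid then 1 else 0)]) [0]
      = (List.range (xs.length + 1)).map (fun i => ((xs.take i).countP p : Int)) := by
  induction xs using List.reverseRecOn with
  | nil => simp
  | append_singleton ys x ih =>
      rw [List.foldl_append, ih]
      simp only [List.foldl_cons, List.foldl_nil]
      have hlast :
          ((List.range (ys.length + 1)).map (fun i => ((ys.take i).countP p : Int))).getLast!
            = ((ys.countP p : Nat) : Int) := by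
        rw [List.range_succ, List.map_append]
        simp
      rw [hlast]
      have hmap : (List.range (ys.length + 1)).map (fun i => ((ys.take i).countP p : Int))
          = (List.range (ys.length + 1)).map (fun i => (((ys ++ [x]).take i).countP p : Int)) := by
        apply List.map_congr_left
        intro i hi
        rw [List.mem_range] at hi
        rw [List.take_append_of_le_length (by omega)]
      rw [hmap]
      have hlen : (ys ++ [x]).length + 1 = (ys.length + 1) + 1 := by simp
      conv_rhs => rw [hlen, List.range_succ, List.map_append]
      congr 1
      simp only [List.map_cons, List.map_nil, List.cons.injEq, and_true]
      rw [List.take_of_length_le (by simp), List.countP_append]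
      push_cast [List.countP_cons, List.countP_nil]
      split_ifs <;> simp

-- A's value for one k equals B's table lookup for that k.
theorem value_eq (retrieved_ids relevant_ids : List String) (k : Int) :
    ((PySem.List.slice retrieved_ids none (some k)).map
        (fun chunk_id => if relevant_ids.contains chunk_id then (1 : Int) else 0)).sum
      = (retrieved_ids.foldl
          (fun acc cid => acc ++ [acc.getLast! + (if relevant_ids.contains cid then 1 else 0)]) [0]).getD
          (if k ≥ 0 then min k (retrieved_ids.length : Int) else max ((retrieved_ids.length : Int) + k) 0).toNat 0 := by
  rw [PySem.List.sum_map_ite_one_zero, pref_eq_map_range]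
  have hslice : PySem.List.slice retrieved_ids none (some k)
      = retrieved_ids.take (PySem.List.clampIdx retrieved_ids.length k) := by
    simp [PySem.List.slice]
  have hidx : (if k ≥ 0 then min k (retrieved_ids.length : Int)
        else max ((retrieved_ids.length : Int) + k) 0).toNat
      = PySem.List.clampIdx retrieved_ids.length k := by
    simp [PySem.List.clampIdx]
    split_ifs <;> omega
  rw [hslice, hidx]
  have hle : PySem.List.clampIdx retrieved_ids.length k ≤ retrieved_ids.length :=
    PySem.List.clampIdx_le _ _
  rw [List.getD_eq_getElem _ _ (by simp only [List.length_map, List.length_range]; omega)]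
  simp

-- ===== VERDICT (by name: the statement is the Claim_ definition above) =====
theorem relevant_in_top_k_counts_spec : Claim_equal_relevant_in_top_k_counts := by
  intro retrieved_ids relevant_ids k_values _
  have h : (fun (counts : PySem.Dict Int Int) (k : Int) =>
        counts.insert k (((PySem.List.slice retrieved_ids none (some k)).map
          (fun chunk_id => if relevant_ids.contains chunk_id then (1 : Int) else 0)).sum))
      = (fun (counts : PySem.Dict Int Int) (k : Int) =>
        counts.insert k ((retrieved_ids.foldl
            (fun acc cid => acc ++ [acc.getLast! + (if relevant_ids.contains cid then 1 else 0)]) [0]).getD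
          (if k ≥ 0 then min k (retrieved_ids.length : Int)
            else max ((retrieved_ids.length : Int) + k) 0).toNat 0)) := by
    funext counts k
    rw [value_eq]
  show (List.foldl _ (PySem.Dict.empty : PySem.Dict Int Int) (k_values.getD [1, 5, 10, 20])).items
      = (List.foldl _ (PySem.Dict.empty : PySem.Dict Int Int) (k_values.getD [1, 5, 10, 20])).items
  rw [h]
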